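-- pv_equiv track=rewrite | github.com/rahil729/breachalert | breach/backend/app/services/notifier.py | _actionable_advice
-- ===== SOURCE A (Python) =====
-- from typing import Dict, List
--
-- def _actionable_advice(data_classes: List[str]) -> str:
--     advice = []
--     if any("password" in item.lower() for item in data_classes):
--         advice.append("• Change your passwords immediately and use a password manager.")
--     if any("credit" in item.lower() for item in data_classes):
--         advice.append("• Place a fraud alert with your bank and monitor credit reports.")
--     if any("phone" in item.lower() for item in data_classes):
--         advice.append("• Expect scam calls and do not share personal details over the phone.")
--     if not advice:
--         advice.append("• Review the exposed account and update security settings.")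
--     return "\n".join(advice)
-- ===== SOURCE B (Python) =====
-- RULES = [
--     ("password", "\u2022 Change your passwords immediately and use a password manager."),
--     ("credit", "\u2022 Place a fraud alert with your bank and monitor credit reports."),
--     ("phone", "\u2022 Expect scam calls and do not share personal details over the phone."),
-- ]
-- FALLBACK = "\u2022 Review the exposed account and update security settings."
--
-- def _actionable_advice(data_classes):
--     matched = set()
--     for item in data_classes:
--         low = item.lower()
--         for kw, _ in RULES:
--             if kw in low:
--                 matched.add(kw)
--     advice = [text for kw, text in RULES if kw in matched]
--     if not advice:
--         advice = [FALLBACK]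
--     return "\n".join(advice)
-- ===== Notes on version B (the rewrite author's own statement) =====
-- stated objective: idiomatic
-- what changed: Replaces three separate any()-scans over the whole list by a data-driven rules table and one collecting pass that records matched keywords in a set, then emits advice by iterating the table.
import Mathlib
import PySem

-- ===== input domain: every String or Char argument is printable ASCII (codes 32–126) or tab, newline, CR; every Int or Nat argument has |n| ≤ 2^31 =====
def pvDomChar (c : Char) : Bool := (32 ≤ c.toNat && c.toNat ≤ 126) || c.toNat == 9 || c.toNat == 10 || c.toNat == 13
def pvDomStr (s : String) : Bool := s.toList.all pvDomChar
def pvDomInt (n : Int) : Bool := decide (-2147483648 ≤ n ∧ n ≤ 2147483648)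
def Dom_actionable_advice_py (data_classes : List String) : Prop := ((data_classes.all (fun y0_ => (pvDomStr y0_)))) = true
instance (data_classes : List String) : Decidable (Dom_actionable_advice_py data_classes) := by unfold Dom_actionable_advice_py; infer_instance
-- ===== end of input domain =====

-- ===== PORT A =====
-- B replaces A's three any()-scans by one collecting pass over a rules table (objective: idiomatic).
def actionable_advice_py (data_classes : List String) : String :=
  let advice : List String := []
  let advice := if data_classes.any (fun item => PySem.Str.isIn "password" (PySem.Str.lower item)) then
      advice ++ ["• Change your passwords immediately and use a password manager."] else advice
  let advice := if data_classes.any (fun item => PySem.Str.isIn "credit" (PySem.Str.lower item)) then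
      advice ++ ["• Place a fraud alert with your bank and monitor credit reports."] else advice
  let advice := if data_classes.any (fun item => PySem.Str.isIn "phone" (PySem.Str.lower item)) then
      advice ++ ["• Expect scam calls and do not share personal details over the phone."] else advice
  let advice := if advice = [] then advice ++ ["• Review the exposed account and update security settings."] else advice
  PySem.Str.join "\n" advice

-- ===== PORT B =====
def pvRules : List (String × String) :=
  [("password", "• Change your passwords immediately and use a password manager."),
   ("credit", "• Place a fraud alert with your bank and monitor credit reports."),
   ("phone", "• Expect scam calls and do not share personal details over the phone.")]

def pvFallback : String := "• Review the exposed account and update security settings."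

def actionable_advice_py_alt (data_classes : List String) : String :=
  let matched : PySem.Set String := data_classes.foldl (fun s item =>
      let low := PySem.Str.lower item
      pvRules.foldl (fun s kv => if PySem.Str.isIn kv.1 low then PySem.Set.add s kv.1 else s) s)
    PySem.Set.empty
  let advice := (pvRules.filter (fun kv => PySem.Set.contains matched kv.1)).map (fun kv => kv.2)
  let advice := if advice = [] then [pvFallback] else advice
  PySem.Str.join "\n" advice

-- ===== PRECONDITION & SPEC =====
def Spec_actionable_advice_py (data_classes : List String) (out : String) : Prop := out = actionable_advice_py_alt data_classes
instance (data_classes : List String) (out : String) : Decidable (Spec_actionable_advice_py data_classes out) := by unfold Spec_actionable_advice_py; infer_instance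

-- ===== CLAIM (what is proved, stated in full; the proofs are below) =====
def Claim_equal_actionable_advice_py : Prop := ∀ (data_classes : List String), Dom_actionable_advice_py data_classes → Spec_actionable_advice_py data_classes (actionable_advice_py data_classes)

-- ===== LEMMAS AND PROOFS =====

lemma pv_step_contains (s : PySem.Set String) (item kw : String)
    (hkw : kw ∈ pvRules.map Prod.fst) :
    PySem.Set.contains (pvRules.foldl (fun s kv => if PySem.Str.isIn kv.1 (PySem.Str.lower item) then PySem.Set.add s kv.1 else s) s) kw
    = (PySem.Set.contains s kw || PySem.Str.isIn kw (PySem.Str.lower item)) := by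
  simp only [pvRules, List.map, List.mem_cons, List.not_mem_nil, or_false] at hkw
  rcases hkw with h | h | h <;> subst h <;>
    simp only [pvRules, List.foldl] <;>
    split_ifs <;> simp_all

lemma pv_fold_contains (l : List String) (s : PySem.Set String) (kw : String)
    (hkw : kw ∈ pvRules.map Prod.fst) :
    PySem.Set.contains (l.foldl (fun s item =>
      pvRules.foldl (fun s kv => if PySem.Str.isIn kv.1 (PySem.Str.lower item) then PySem.Set.add s kv.1 else s) s) s) kw
    = (PySem.Set.contains s kw || l.any (fun item => PySem.Str.isIn kw (PySem.Str.lower item))) := by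
  induction l generalizing s with
  | nil => simp
  | cons x xs ih =>
    simp only [List.foldl_cons, List.any_cons, ih]
    rw [pv_step_contains _ _ _ hkw]
    simp [Bool.or_assoc]

-- ===== VERDICT (by name: the statement is the Claim_ definition above) =====
lemma pv_matched (dc : List String) (kw : String) (hkw : kw ∈ pvRules.map Prod.fst) :
    PySem.Set.contains (dc.foldl (fun s item =>
      pvRules.foldl (fun s kv => if PySem.Str.isIn kv.1 (PySem.Str.lower item) then PySem.Set.add s kv.1 else s) s) PySem.Set.empty) kw
    = dc.any (fun item => PySem.Str.isIn kw (PySem.Str.lower item)) := by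
  rw [pv_fold_contains _ _ _ hkw]
  simp [PySem.Set.empty]

lemma pv_advice (M : PySem.Set String) :
    (pvRules.filter (fun kv => PySem.Set.contains M kv.1)).map (fun kv => kv.2) =
    ((if PySem.Set.contains M "password" then ["• Change your passwords immediately and use a password manager."] else []) ++
     (if PySem.Set.contains M "credit" then ["• Place a fraud alert with your bank and monitor credit reports."] else []) ++
     (if PySem.Set.contains M "phone" then ["• Expect scam calls and do not share personal details over the phone."] else [])) := by
  by_cases h1 : "password" ∈ M <;> by_cases h2 : "credit" ∈ M <;> by_cases h3 : "phone" ∈ M <;>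
    simp [pvRules, List.filter, h1, h2, h3]

theorem actionable_advice_py_spec : Claim_equal_actionable_advice_py := by
  intro dc _
  show actionable_advice_py dc = actionable_advice_py_alt dc
  simp only [actionable_advice_py, actionable_advice_py_alt]
  rw [pv_advice,
    pv_matched dc "password" (by simp [pvRules]),
    pv_matched dc "credit" (by simp [pvRules]),
    pv_matched dc "phone" (by simp [pvRules])]
  cases hb1 : dc.any (fun item => PySem.Str.isIn "password" (PySem.Str.lower item)) <;>
  cases hb2 : dc.any (fun item => PySem.Str.isIn "credit" (PySem.Str.lower item)) <;>
  cases hb3 : dc.any (fun item => PySem.Str.isIn "phone" (PySem.Str.lower item)) <;>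
  simp [pvFallback]
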